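-- pv_equiv track=rewrite | github.com/sofiaariza/SecuenciacionTrabajosCAP | SecuenciacionTrabajosCAP.py | agendamientoCamas
-- ===== SOURCE A (Python) =====
-- def agendamientoCamas(bins,s):
--     camasOrdenadas=sorted(bins.keys(), key = lambda x: bins[x][1])
--     ans,N = [],len(camasOrdenadas)
--     f=s
--     for bin in camasOrdenadas:
--         si=f
--         si=si%24
--         ti=bins[bin][2]
--         fi=f+ti
--         fi=fi%24
--         f=fi
--         ans.append([bin, bins[bin][0], si, fi])
--     return ans
-- ===== SOURCE B (Python) =====
-- def agendamientoCamas(bins, s):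
--     orden = sorted(bins, key=lambda k: bins[k][1])
--     dur = [bins[k][2] for k in orden]
--     return [[k, bins[k][0], (s + sum(dur[:i])) % 24, (s + sum(dur[:i + 1])) % 24]
--             for i, k in enumerate(orden)]
-- ===== Notes on version B (the rewrite author's own statement) =====
-- stated objective: alternative
-- what changed: Drops the running accumulator entirely: each row's start/end hours are recomputed independently by the closed form (s + sum(dur[:i])) % 24 over a slice of the duration list, so rows are stateless and order-independent (an O(n^2) per-index formulation vs A's O(n) stateful sweep).
import Mathlib
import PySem

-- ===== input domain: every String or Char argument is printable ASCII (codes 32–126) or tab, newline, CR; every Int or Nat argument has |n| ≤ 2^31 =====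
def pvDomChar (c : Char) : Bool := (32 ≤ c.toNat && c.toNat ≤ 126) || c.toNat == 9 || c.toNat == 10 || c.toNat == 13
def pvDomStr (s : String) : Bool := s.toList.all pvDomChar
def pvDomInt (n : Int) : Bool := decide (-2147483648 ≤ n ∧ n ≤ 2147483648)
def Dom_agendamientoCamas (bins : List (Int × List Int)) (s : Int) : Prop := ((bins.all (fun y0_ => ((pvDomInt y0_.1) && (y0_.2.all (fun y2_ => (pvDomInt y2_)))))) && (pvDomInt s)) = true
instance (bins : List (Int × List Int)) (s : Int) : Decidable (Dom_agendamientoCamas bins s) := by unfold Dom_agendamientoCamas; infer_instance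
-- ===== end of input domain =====

-- B is a stateless per-index formulation: each row's hours are recomputed from scratch
-- as (s + sum(dur[:i])) % 24, replacing A's mutated running accumulator. Return values only.

-- ===== PORT A =====
def agendamientoCamas (bins : List (Int × List Int)) (s : Int) : List (List Int) :=
  let d : PySem.Dict Int (List Int) := PySem.Dict.ofList bins
  let camasOrdenadas := PySem.List.sorted d.keys (fun x => PySem.List.pyGetD (d.getD x []) 1 0) false
  let r := camasOrdenadas.foldl (fun (st : Int × List (List Int)) bin =>
      let f := st.1
      let si := PySem.Int.mod f 24
      let ti := PySem.List.pyGetD (d.getD bin []) 2 0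
      let fi := PySem.Int.mod (f + ti) 24
      (fi, st.2 ++ [[bin, PySem.List.pyGetD (d.getD bin []) 0 0, si, fi]]))
    (s, ([] : List (List Int)))
  r.2

-- ===== PORT B =====
def agendamientoCamas_alt (bins : List (Int × List Int)) (s : Int) : List (List Int) :=
  let d : PySem.Dict Int (List Int) := PySem.Dict.ofList bins
  let orden := PySem.List.sorted d.keys (fun k => PySem.List.pyGetD (d.getD k []) 1 0) false
  let dur := orden.map (fun k => PySem.List.pyGetD (d.getD k []) 2 0)
  (PySem.List.enumerate orden 0).map (fun ik =>
      [ik.2, PySem.List.pyGetD (d.getD ik.2 []) 0 0,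
       PySem.Int.mod (s + (PySem.List.slice dur none (some ik.1)).sum) 24,
       PySem.Int.mod (s + (PySem.List.slice dur none (some (ik.1 + 1))).sum) 24])

-- ===== PRECONDITION & SPEC =====
-- Pre_ excludes exactly the inputs on which A raises an IndexError: some value list of the
-- (deduplicated) dict has fewer than 3 elements, so bins[k][1] or bins[k][2] raises.
def Pre_agendamientoCamas (bins : List (Int × List Int)) (s : Int) : Prop :=
  ∀ p ∈ (PySem.Dict.ofList bins : PySem.Dict Int (List Int)).items, 3 ≤ p.2.length
instance (bins : List (Int × List Int)) (s : Int) : Decidable (Pre_agendamientoCamas bins s) := by unfold Pre_agendamientoCamas; infer_instance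

def pvWitness_agendamientoCamas : (List (Int × List Int)) × Int :=
  ([(1, [7, 2, 5]), (2, [9, 1, 30])], 3)

def Spec_agendamientoCamas (bins : List (Int × List Int)) (s : Int) (out : List (List Int)) : Prop := out = agendamientoCamas_alt bins s
instance (bins : List (Int × List Int)) (s : Int) (out : List (List Int)) : Decidable (Spec_agendamientoCamas bins s out) := by unfold Spec_agendamientoCamas; infer_instance

-- ===== CLAIM (what is proved, stated in full; the proofs are below) =====
def Claim_equal_agendamientoCamas : Prop := ∀ (bins : List (Int × List Int)) (s : Int), Dom_agendamientoCamas bins s → Pre_agendamientoCamas bins s → Spec_agendamientoCamas bins s (agendamientoCamas bins s)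

-- ===== LEMMAS AND PROOFS =====

-- Common reference form both ports are reduced to: a recursion carrying the raw offset.
def agRef (d : PySem.Dict Int (List Int)) : List Int → Int → List (List Int)
  | [], _ => []
  | k :: rest, acc =>
      let t := PySem.List.pyGetD (d.getD k []) 2 0
      [k, PySem.List.pyGetD (d.getD k []) 0 0, PySem.Int.mod acc 24, PySem.Int.mod (acc + t) 24]
        :: agRef d rest (acc + t)

lemma mod24_congr {f acc : Int} (t : Int) (h : PySem.Int.mod f 24 = PySem.Int.mod acc 24) :
    PySem.Int.mod (f + t) 24 = PySem.Int.mod (acc + t) 24 := by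
  simp only [PySem.Int.mod_eq_emod_of_pos (by norm_num : (0:Int) < 24)] at h ⊢
  omega

-- A's loop equals the reference recursion whenever the carried values agree mod 24.
lemma ag_loop_eq (d : PySem.Dict Int (List Int)) :
    ∀ (l : List Int) (f acc : Int) (ans : List (List Int)),
      PySem.Int.mod f 24 = PySem.Int.mod acc 24 →
      (l.foldl (fun (st : Int × List (List Int)) bin =>
          let fv := st.1
          let si := PySem.Int.mod fv 24
          let ti := PySem.List.pyGetD (d.getD bin []) 2 0
          let fi := PySem.Int.mod (fv + ti) 24
          (fi, st.2 ++ [[bin, PySem.List.pyGetD (d.getD bin []) 0 0, si, fi]])) (f, ans)).2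
        = ans ++ agRef d l acc := by
  intro l
  induction l with
  | nil => intro f acc ans _; simp [agRef]
  | cons k rest ih =>
      intro f acc ans h
      simp only [List.foldl_cons, agRef]
      rw [ih _ _ _ (by
        have := mod24_congr (PySem.List.pyGetD (d.getD k []) 2 0) h
        simpa [PySem.Int.mod_eq_emod_of_pos (by norm_num : (0:Int) < 24), Int.emod_emod_of_dvd]
          using congrArg (fun x => PySem.Int.mod x 24) this)]
      simp only [PySem.Int.mod_eq_emod_of_pos (by norm_num : (0:Int) < 24)] at h
      simp
      exact ⟨h, by omega⟩

-- B's stateless map equals the reference recursion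
-- (pre = the durations of the keys already consumed to the left of the current index).
lemma ag_map_eq (d : PySem.Dict Int (List Int)) (s : Int) :
    ∀ (l : List Int) (pre : List Int),
      (PySem.List.enumerate l (pre.length : Int)).map (fun ik =>
          [ik.2, PySem.List.pyGetD (d.getD ik.2 []) 0 0,
           PySem.Int.mod (s + (PySem.List.slice
              (pre ++ l.map (fun k => PySem.List.pyGetD (d.getD k []) 2 0)) none (some ik.1)).sum) 24,
           PySem.Int.mod (s + (PySem.List.slice
              (pre ++ l.map (fun k => PySem.List.pyGetD (d.getD k []) 2 0)) none (some (ik.1 + 1))).sum) 24])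
        = agRef d l (s + pre.sum) := by
  intro l
  induction l with
  | nil => intro pre; simp [PySem.List.enumerate_nil, agRef]
  | cons k rest ih =>
      intro pre
      rw [PySem.List.enumerate_cons, List.map_cons, agRef]
      set t := PySem.List.pyGetD (d.getD k []) 2 0 with ht
      have hfull : pre ++ (k :: rest).map (fun k => PySem.List.pyGetD (d.getD k []) 2 0)
          = (pre ++ [t]) ++ rest.map (fun k => PySem.List.pyGetD (d.getD k []) 2 0) := by
        simp [ht]
      have h0 : PySem.List.slice
          (pre ++ (k :: rest).map (fun k => PySem.List.pyGetD (d.getD k []) 2 0))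
          none (some (pre.length : Int)) = pre := by
        rw [PySem.List.slice_to_natCast]
        simp
      have h1 : PySem.List.slice
          (pre ++ (k :: rest).map (fun k => PySem.List.pyGetD (d.getD k []) 2 0))
          none (some ((pre.length : Int) + 1)) = pre ++ [t] := by
        rw [hfull, show ((pre.length : Int) + 1) = (((pre ++ [t]).length : Nat) : Int) by simp,
          PySem.List.slice_to_natCast]
        simp only [List.length_append, List.length_cons, List.length_nil, Nat.zero_add]
        rw [show pre.length + 1 = (pre ++ [t]).length by simp, List.take_left]
      congr 1
      · simp only [h0, h1, List.sum_append, List.sum_cons, List.sum_nil]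
        congr 2
        ring_nf
      · have hlen : ((pre.length : Int) + 1) = (((pre ++ [t]).length : Nat) : Int) := by simp
        rw [hlen, hfull]
        have := ih (pre ++ [t])
        simpa [add_assoc] using this

theorem agendamientoCamas_key (bins : List (Int × List Int)) (s : Int) :
    agendamientoCamas bins s = agendamientoCamas_alt bins s := by
  simp only [agendamientoCamas, agendamientoCamas_alt]
  rw [ag_loop_eq _ _ s s [] rfl]
  have := ag_map_eq (PySem.Dict.ofList bins) s
    (PySem.List.sorted (PySem.Dict.ofList bins).keys
      (fun k => PySem.List.pyGetD ((PySem.Dict.ofList bins).getD k []) 1 0) false) []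
  simpa using this.symm

-- ===== VERDICT (by name: the statement is the Claim_ definition above) =====
theorem agendamientoCamas_spec : Claim_equal_agendamientoCamas := by
  intro bins s _ _
  unfold Spec_agendamientoCamas
  exact agendamientoCamas_key bins s
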